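-- pv_equiv track=rewrite | github.com/AshlinJoelSizzin/Grievance_Portal | issue_handler_proj_test.py | socioeconomic_clustering
-- ===== SOURCE A (Python) =====
-- def socioeconomic_clustering(socioeconomic_metadata):
--     # TODO: Check if any other metadata other than salary needed for this category
--     results_levels = []
--     results_scores = []
--
--     for salary in socioeconomic_metadata:
--         # TODO: Change the threshold values or make them dynamic here
--         if salary >= 75000:
--             results_levels.append("High Socio-Economic Area")
--             results_scores.append(3)
--         elif salary >= 30000:
--             results_levels.append("Medium Socio-Economic Area")
--             results_scores.append(2)
--         else:
--             results_levels.append("Low Socio-Economic Area")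
--             results_scores.append(1)
--
--     # Returning a list of socioeconomic levels respective to each complaint in original indexes
--     # Levels for testing and scores for functionality
--     return results_levels, results_scores
-- ===== SOURCE B (Python) =====
-- def _bisect_right(a, x):
--     lo, hi = 0, len(a)
--     while lo < hi:
--         mid = (lo + hi) // 2
--         if x < a[mid]:
--             hi = mid
--         else:
--             lo = mid + 1
--     return lo
--
--
-- def socioeconomic_clustering(socioeconomic_metadata):
--     thresholds = [30000, 75000]
--     levels = ["Low Socio-Economic Area", "Medium Socio-Economic Area",
--               "High Socio-Economic Area"]
--     scores = [1, 2, 3]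
--     idxs = [_bisect_right(thresholds, salary) for salary in socioeconomic_metadata]
--     return [levels[i] for i in idxs], [scores[i] for i in idxs]
-- ===== Notes on version B (the rewrite author's own statement) =====
-- stated objective: alternative
-- what changed: Replaces the per-salary branch cascade with a hand-written bisect_right binary search into a sorted threshold table and parallel level/score lookup tables indexed by the bucket.
import Mathlib
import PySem

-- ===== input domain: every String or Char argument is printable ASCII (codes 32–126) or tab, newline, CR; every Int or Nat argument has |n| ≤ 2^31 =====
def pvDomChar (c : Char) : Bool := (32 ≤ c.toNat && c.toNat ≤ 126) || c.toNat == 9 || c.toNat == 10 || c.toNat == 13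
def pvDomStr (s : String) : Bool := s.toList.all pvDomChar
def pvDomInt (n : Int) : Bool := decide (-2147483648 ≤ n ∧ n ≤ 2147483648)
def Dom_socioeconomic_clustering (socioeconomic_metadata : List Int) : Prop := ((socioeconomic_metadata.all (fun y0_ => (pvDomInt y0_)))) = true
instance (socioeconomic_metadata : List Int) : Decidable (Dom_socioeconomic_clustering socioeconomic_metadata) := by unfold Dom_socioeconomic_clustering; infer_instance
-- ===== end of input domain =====

-- ===== PORT A =====
-- B replaces A's branch cascade by a binary-search (bisect_right) index into parallel
-- threshold/level/score tables; same return value, different structure.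
def socioeconomic_clustering (socioeconomic_metadata : List Int) : List String × List Int :=
  socioeconomic_metadata.foldl
    (fun (acc : List String × List Int) salary =>
      if salary ≥ 75000 then (acc.1 ++ ["High Socio-Economic Area"], acc.2 ++ [3])
      else if salary ≥ 30000 then (acc.1 ++ ["Medium Socio-Economic Area"], acc.2 ++ [2])
      else (acc.1 ++ ["Low Socio-Economic Area"], acc.2 ++ [1]))
    ([], [])

-- ===== PORT B =====
-- hand-written bisect_right loop from Source B (while lo < hi); exact transcription
def pvBisectLoop (a : List Int) (x : Int) (lo hi : Nat) : Nat :=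
  if _h : lo < hi then
    let mid := (lo + hi) / 2
    if x < a.getD mid 0 then pvBisectLoop a x lo mid
    else pvBisectLoop a x (mid + 1) hi
  else lo
termination_by hi - lo
decreasing_by all_goals omega

def pvBisectRight (a : List Int) (x : Int) : Nat := pvBisectLoop a x 0 a.length

def socioeconomic_clustering_alt (socioeconomic_metadata : List Int) : List String × List Int :=
  let thresholds : List Int := [30000, 75000]
  let levels : List String :=
    ["Low Socio-Economic Area", "Medium Socio-Economic Area", "High Socio-Economic Area"]
  let scores : List Int := [1, 2, 3]
  let idxs := socioeconomic_metadata.map (fun salary => pvBisectRight thresholds salary)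
  (idxs.map (fun i => levels.getD i ""), idxs.map (fun i => scores.getD i 0))

-- ===== PRECONDITION & SPEC =====
def Spec_socioeconomic_clustering (socioeconomic_metadata : List Int) (out : List String × List Int) : Prop := out = socioeconomic_clustering_alt socioeconomic_metadata
instance (socioeconomic_metadata : List Int) (out : List String × List Int) : Decidable (Spec_socioeconomic_clustering socioeconomic_metadata out) := by unfold Spec_socioeconomic_clustering; infer_instance

-- ===== CLAIM (what is proved, stated in full; the proofs are below) =====
def Claim_equal_socioeconomic_clustering : Prop := ∀ (socioeconomic_metadata : List Int), Dom_socioeconomic_clustering socioeconomic_metadata → Spec_socioeconomic_clustering socioeconomic_metadata (socioeconomic_clustering socioeconomic_metadata)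

-- ===== LEMMAS AND PROOFS =====

-- ===== VERDICT (by name: the statement is the Claim_ definition above) =====
lemma pvBisect_eq (s : Int) :
    pvBisectRight [30000, 75000] s =
      if s ≥ 75000 then 2 else if s ≥ 30000 then 1 else 0 := by
  unfold pvBisectRight
  rw [pvBisectLoop.eq_def]; norm_num
  all_goals first | omega | (rw [pvBisectLoop.eq_def]; norm_num)
  all_goals first | omega | (rw [pvBisectLoop.eq_def]; norm_num)
  all_goals first | omega | (rw [pvBisectLoop.eq_def]; norm_num)
  all_goals first | omega | (rw [pvBisectLoop.eq_def]; norm_num)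
  all_goals (split_ifs <;> omega)

lemma pv_foldl_eq (m : List Int) (acc : List String × List Int) :
    m.foldl
      (fun (acc : List String × List Int) salary =>
        if salary ≥ 75000 then (acc.1 ++ ["High Socio-Economic Area"], acc.2 ++ [3])
        else if salary ≥ 30000 then (acc.1 ++ ["Medium Socio-Economic Area"], acc.2 ++ [2])
        else (acc.1 ++ ["Low Socio-Economic Area"], acc.2 ++ [1]))
      acc =
    (acc.1 ++ m.map (fun s =>
        (["Low Socio-Economic Area", "Medium Socio-Economic Area",
          "High Socio-Economic Area"] : List String).getD (pvBisectRight [30000, 75000] s) ""),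
     acc.2 ++ m.map (fun s =>
        ([1, 2, 3] : List Int).getD (pvBisectRight [30000, 75000] s) 0)) := by
  induction m generalizing acc with
  | nil => simp
  | cons x xs ih =>
    simp only [List.foldl_cons, List.map_cons, ih, pvBisect_eq]
    split_ifs <;> simp

theorem socioeconomic_clustering_spec : Claim_equal_socioeconomic_clustering := by
  intro m _
  unfold Spec_socioeconomic_clustering socioeconomic_clustering socioeconomic_clustering_alt
  simp [pv_foldl_eq, List.map_map, Function.comp]
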